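-- pv_equiv track=rewrite | github.com/HSUNEH/xLoop | scripts/strategy_engine.py | _converge
-- ===== SOURCE A (Python) =====
-- def _converge(candidates, constraints=None, allowed_tools=None):
--     """제약 조건으로 candidates를 필터링하고 우선순위를 조정."""
--     if not candidates:
--         return []
--
--     filtered = list(candidates)
--
--     # 허용된 도구로 필터링
--     if allowed_tools:
--         allowed_set = set(allowed_tools)
--         filtered = [c for c in filtered if c["tool"] in allowed_set]
--
--     # 제약 조건 텍스트에 매칭되는 task에 priority 상향
--     if constraints:
--         for task in filtered:
--             desc_lower = task["description"].lower()
--             for constraint in constraints: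
--                 if constraint.lower() in desc_lower:
--                     task["priority"] = "high"
--                     break
--
--     # 우선순위 정렬: high → medium → low
--     priority_order = {"high": 0, "medium": 1, "low": 2}
--     filtered.sort(key=lambda t: priority_order.get(t["priority"], 1))
--
--     return filtered
-- ===== SOURCE B (Python) =====
-- def _converge(candidates, constraints=None, allowed_tools=None):
--     """Same filtering/priority-bump, but the final stable sort is replaced by
--     one linear bucket pass (high/medium/low), all in a single loop."""
--     allowed = set(allowed_tools) if allowed_tools else None
--     lowered = [c.lower() for c in constraints] if constraints else []
--     high, medium, low = [], [], []
--     for task in candidates: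
--         if allowed is not None and task["tool"] not in allowed:
--             continue
--         if lowered:
--             desc = task["description"].lower()
--             if any(c in desc for c in lowered):
--                 task["priority"] = "high"
--         p = task["priority"]
--         if p == "high":
--             high.append(task)
--         elif p == "low":
--             low.append(task)
--         else:
--             medium.append(task)
--     return high + medium + low
-- ===== Notes on version B (the rewrite author's own statement) =====
-- stated objective: simpler
-- what changed: The three passes (filter, bump loop, stable sort by a priority-order dict) are fused into one linear pass that appends each surviving task to a high/medium/low bucket (unknown priorities go to medium, matching get(...,1)) and returns high+medium+low, replacing the O(n log n) sort with an O(n) stable partition.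
import Mathlib
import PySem

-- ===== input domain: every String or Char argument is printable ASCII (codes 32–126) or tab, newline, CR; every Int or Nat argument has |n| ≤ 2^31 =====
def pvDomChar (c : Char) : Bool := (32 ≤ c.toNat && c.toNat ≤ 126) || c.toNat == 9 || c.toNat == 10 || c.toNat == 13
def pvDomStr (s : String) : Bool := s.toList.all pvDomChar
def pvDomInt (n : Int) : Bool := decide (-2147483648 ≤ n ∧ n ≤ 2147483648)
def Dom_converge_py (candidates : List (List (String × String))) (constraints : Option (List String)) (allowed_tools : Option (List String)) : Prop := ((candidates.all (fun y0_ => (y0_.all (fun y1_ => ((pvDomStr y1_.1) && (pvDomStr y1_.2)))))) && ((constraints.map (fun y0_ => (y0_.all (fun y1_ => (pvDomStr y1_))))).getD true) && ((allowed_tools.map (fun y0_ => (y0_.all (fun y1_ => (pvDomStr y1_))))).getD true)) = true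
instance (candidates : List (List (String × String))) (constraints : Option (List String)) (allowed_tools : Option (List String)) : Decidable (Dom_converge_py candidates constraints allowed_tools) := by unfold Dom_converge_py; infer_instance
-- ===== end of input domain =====

-- B fuses A's filter pass, bump pass and stable sort into one linear bucket pass (high/medium/low);
-- both versions mutate the candidate dicts' "priority" in place, the equivalence proved is about the return value.

-- ===== PORT A =====
-- priority_order.get(t["priority"], 1) — the sort key of A
def pvPrioKey (t : List (String × String)) : Int :=
  (PySem.Dict.mk [("high", (0 : Int)), ("medium", 1), ("low", 2)]).getD
    ((PySem.Dict.get? (PySem.Dict.mk t) "priority").getD "") 1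

-- the body of A's constraints loop on one task (break-on-first-match = List.any)
def pvBumpA (cs : List String) (t : List (String × String)) : List (String × String) :=
  if cs.any (fun con => PySem.Str.isIn (PySem.Str.lower con)
      (PySem.Str.lower ((PySem.Dict.get? (PySem.Dict.mk t) "description").getD ""))) then
    ((PySem.Dict.mk t).insert "priority" "high").items
  else t

def converge_py (candidates : List (List (String × String))) (constraints : Option (List String)) (allowed_tools : Option (List String)) : List (List (String × String)) :=
  if candidates = [] then []
  else
    let filtered :=
      match allowed_tools with
      | some (a :: rest) =>
          candidates.filter (fun c =>
            PySem.Set.contains (PySem.Set.ofList (a :: rest))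
              ((PySem.Dict.get? (PySem.Dict.mk c) "tool").getD ""))
      | _ => candidates
    let bumped :=
      match constraints with
      | some (k :: rest) => filtered.map (pvBumpA (k :: rest))
      | _ => filtered
    PySem.List.sorted bumped pvPrioKey

-- ===== PORT B =====
-- one step of B's single loop: skip non-allowed tools, bump, append into the right bucket
def pvStepB (allowed_tools : Option (List String)) (lowered : List String)
    (st : List (List (String × String)) × List (List (String × String)) × List (List (String × String)))
    (task : List (String × String)) :
    List (List (String × String)) × List (List (String × String)) × List (List (String × String)) :=
  let ts := allowed_tools.getD []
  let skip :=
    if ts.isEmpty then false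
    else ! PySem.Set.contains (PySem.Set.ofList ts)
            ((PySem.Dict.get? (PySem.Dict.mk task) "tool").getD "")
  if skip then st
  else
    let t :=
      if lowered.any (fun lc => PySem.Str.isIn lc
          (PySem.Str.lower ((PySem.Dict.get? (PySem.Dict.mk task) "description").getD ""))) then
        ((PySem.Dict.mk task).insert "priority" "high").items
      else task
    let p := (PySem.Dict.get? (PySem.Dict.mk t) "priority").getD ""
    if p = "high" then (st.1 ++ [t], st.2.1, st.2.2)
    else if p = "low" then (st.1, st.2.1, st.2.2 ++ [t])
    else (st.1, st.2.1 ++ [t], st.2.2)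

def converge_py_alt (candidates : List (List (String × String))) (constraints : Option (List String)) (allowed_tools : Option (List String)) : List (List (String × String)) :=
  let lowered := (constraints.getD []).map PySem.Str.lower
  let st := candidates.foldl (pvStepB allowed_tools lowered) ([], [], [])
  st.1 ++ st.2.1 ++ st.2.2

-- ===== PRECONDITION & SPEC =====
-- Pre_ excludes exactly the inputs where Python A raises KeyError: a candidate missing "tool" while
-- allowed_tools is truthy, or a tool-surviving candidate missing "description" while constraints is
-- truthy, or missing "priority" (read by the sort key) without a matching constraint having written it.
def Pre_converge_py (candidates : List (List (String × String))) (constraints : Option (List String)) (allowed_tools : Option (List String)) : Prop :=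
  ∀ c ∈ candidates,
    ((allowed_tools.getD []).isEmpty = false →
      (PySem.Dict.mk c).contains "tool" = true) ∧
    (((allowed_tools.getD []).isEmpty ||
      PySem.Set.contains (PySem.Set.ofList (allowed_tools.getD []))
        ((PySem.Dict.get? (PySem.Dict.mk c) "tool").getD "")) = true →
      (((constraints.getD []).isEmpty = false →
         (PySem.Dict.mk c).contains "description" = true) ∧
       ((PySem.Dict.mk c).contains "priority" ||
         (constraints.getD []).any (fun k => PySem.Str.isIn (PySem.Str.lower k)
           (PySem.Str.lower ((PySem.Dict.get? (PySem.Dict.mk c) "description").getD "")))) = true))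
instance (candidates : List (List (String × String))) (constraints : Option (List String)) (allowed_tools : Option (List String)) : Decidable (Pre_converge_py candidates constraints allowed_tools) := by unfold Pre_converge_py; infer_instance

def pvWitness_converge_py : (List (List (String × String))) × Option (List String) × Option (List String) :=
  ([[("tool", "t1"), ("description", "fix the DB"), ("priority", "low")],
    [("tool", "t2"), ("description", "other"), ("priority", "medium")],
    [("tool", "t1"), ("description", "urgent db work"), ("priority", "low")]],
   some ["db"], some ["t1"])

def Spec_converge_py (candidates : List (List (String × String))) (constraints : Option (List String)) (allowed_tools : Option (List String)) (out : List (List (String × String))) : Prop := out = converge_py_alt candidates constraints allowed_tools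
instance (candidates : List (List (String × String))) (constraints : Option (List String)) (allowed_tools : Option (List String)) (out : List (List (String × String))) : Decidable (Spec_converge_py candidates constraints allowed_tools out) := by unfold Spec_converge_py; infer_instance

-- ===== CLAIM (what is proved, stated in full; the proofs are below) =====
def Claim_equal_converge_py : Prop := ∀ (candidates : List (List (String × String))) (constraints : Option (List String)) (allowed_tools : Option (List String)), Dom_converge_py candidates constraints allowed_tools → Pre_converge_py candidates constraints allowed_tools → Spec_converge_py candidates constraints allowed_tools (converge_py candidates constraints allowed_tools)

-- ===== LEMMAS AND PROOFS =====

-- the survive / bump / priority pieces both programs share, named for the proofs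
def pvSurv (allowed_tools : Option (List String)) (c : List (String × String)) : Bool :=
  if (allowed_tools.getD []).isEmpty then true
  else PySem.Set.contains (PySem.Set.ofList (allowed_tools.getD []))
        ((PySem.Dict.get? (PySem.Dict.mk c) "tool").getD "")

def pvBumpL (lowered : List String) (t : List (String × String)) : List (String × String) :=
  if lowered.any (fun lc => PySem.Str.isIn lc
      (PySem.Str.lower ((PySem.Dict.get? (PySem.Dict.mk t) "description").getD ""))) then
    ((PySem.Dict.mk t).insert "priority" "high").items
  else t

def pvPr (t : List (String × String)) : String :=
  (PySem.Dict.get? (PySem.Dict.mk t) "priority").getD ""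

lemma key_eq (t : List (String × String)) :
    pvPrioKey t = if pvPr t = "high" then 0 else if pvPr t = "medium" then 1 else if pvPr t = "low" then 2 else 1 := by
  have h : pvPrioKey t = (PySem.Dict.mk [("high", (0 : Int)), ("medium", 1), ("low", 2)]).getD (pvPr t) 1 := rfl
  rw [h]
  generalize pvPr t = p
  rw [PySem.Dict.getD_eq_get?_getD, PySem.Dict.get?_mk_cons, PySem.Dict.get?_mk_cons, PySem.Dict.get?_mk_cons]
  simp only [beq_iff_eq]
  split_ifs <;> first | rfl | (exfalso; subst_vars; simp at *)

lemma pvPrioKey_cases (t : List (String × String)) :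
    pvPrioKey t = 0 ∨ pvPrioKey t = 1 ∨ pvPrioKey t = 2 := by
  rw [key_eq]; split_ifs <;> simp

lemma pvKey0 (t : List (String × String)) : (pvPrioKey t == 0) = (pvPr t == "high") := by
  rw [key_eq]; split_ifs <;> simp_all

lemma pvKey2 (t : List (String × String)) : (pvPrioKey t == 2) = (pvPr t == "low") := by
  rw [key_eq]; split_ifs <;> simp_all

lemma pvKey1 (t : List (String × String)) :
    (pvPrioKey t == 1) = (!(pvPr t == "high") && !(pvPr t == "low")) := by
  rw [key_eq]; split_ifs <;> simp_all

lemma pvInsertBy_append {α : Type} (before : α → α → Bool) (x : α) (p s : List α)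
    (h : ∀ y ∈ p, before x y = false) :
    PySem.List.insertBy before x (p ++ s) = p ++ PySem.List.insertBy before x s := by
  induction p with
  | nil => simp
  | cons a as ih =>
      have ha : before x a = false := h a (by simp)
      simp only [List.cons_append, PySem.List.insertBy, ha]
      simp [ih (fun y hy => h y (by simp [hy]))]

lemma pvInsertBy_cons {α : Type} (before : α → α → Bool) (x : α) (s : List α)
    (h : ∀ y ∈ s, before x y = true) :
    PySem.List.insertBy before x s = x :: s := by
  cases s with
  | nil => rfl
  | cons a as => simp [PySem.List.insertBy, h a (by simp)]

-- the stable sort by a key with values in {0,1,2} is the three-bucket concatenation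
lemma pvFoldInsert (k : List (String × String) → Int)
    (hk : ∀ x, k x = 0 ∨ k x = 1 ∨ k x = 2) :
    ∀ (xs a0 a1 a2 : List (List (String × String))),
    (∀ y ∈ a0, k y = 0) → (∀ y ∈ a1, k y = 1) → (∀ y ∈ a2, k y = 2) →
    xs.foldl (fun acc x => PySem.List.insertBy (fun a b => decide (k a < k b)) x acc)
      (a0 ++ a1 ++ a2)
    = (a0 ++ xs.filter (fun x => k x == 0)) ++ (a1 ++ xs.filter (fun x => k x == 1))
      ++ (a2 ++ xs.filter (fun x => k x == 2)) := by
  intro xs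
  induction xs with
  | nil => intro a0 a1 a2 _ _ _; simp
  | cons x xs ih =>
      intro a0 a1 a2 h0 h1 h2
      simp only [List.foldl_cons]
      rcases hk x with hx | hx | hx
      · have step : PySem.List.insertBy (fun a b => decide (k a < k b)) x (a0 ++ a1 ++ a2)
            = (a0 ++ [x]) ++ a1 ++ a2 := by
          rw [List.append_assoc, pvInsertBy_append _ _ a0 (a1 ++ a2)
            (fun y hy => by simp [hx, h0 y hy]),
            pvInsertBy_cons _ _ _ (fun y hy => by
              rcases List.mem_append.1 hy with h | h
              · simp [hx, h1 y h]
              · simp [hx, h2 y h])]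
          simp
        rw [step, ih (a0 ++ [x]) a1 a2
          (fun y hy => by rcases List.mem_append.1 hy with h | h
                          · exact h0 y h
                          · simp_all) h1 h2]
        simp [hx]
      · have step : PySem.List.insertBy (fun a b => decide (k a < k b)) x (a0 ++ a1 ++ a2)
            = a0 ++ (a1 ++ [x]) ++ a2 := by
          rw [List.append_assoc, pvInsertBy_append _ _ a0 (a1 ++ a2)
            (fun y hy => by simp [hx, h0 y hy]),
            pvInsertBy_append _ _ a1 a2 (fun y hy => by simp [hx, h1 y hy]),
            pvInsertBy_cons _ _ _ (fun y hy => by simp [hx, h2 y hy])]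
          simp
        rw [step, ih a0 (a1 ++ [x]) a2 h0
          (fun y hy => by rcases List.mem_append.1 hy with h | h
                          · exact h1 y h
                          · simp_all) h2]
        simp [hx]
      · have step : PySem.List.insertBy (fun a b => decide (k a < k b)) x (a0 ++ a1 ++ a2)
            = a0 ++ a1 ++ (a2 ++ [x]) := by
          rw [PySem.List.insertBy_of_forall_not_before _ _ _ (fun y hy => by
            rcases List.mem_append.1 hy with h | h
            · rcases List.mem_append.1 h with h' | h'
              · simp [hx, h0 y h']
              · simp [hx, h1 y h']
            · simp [hx, h2 y h])]
          simp
        rw [step, ih a0 a1 (a2 ++ [x]) h0 h1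
          (fun y hy => by rcases List.mem_append.1 hy with h | h
                          · exact h2 y h
                          · simp_all)]
        simp [hx]

lemma pvSorted_buckets (xs : List (List (String × String))) :
    PySem.List.sorted xs pvPrioKey
    = xs.filter (fun x => pvPrioKey x == 0) ++ xs.filter (fun x => pvPrioKey x == 1)
      ++ xs.filter (fun x => pvPrioKey x == 2) := by
  rw [PySem.List.sorted_eq_foldl_insertBy]
  have := pvFoldInsert pvPrioKey pvPrioKey_cases xs [] [] []
    (by simp) (by simp) (by simp)
  simpa using this

lemma pvBumpL_nil (t : List (String × String)) : pvBumpL [] t = t := by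
  simp [pvBumpL]

lemma pvBumpA_eq_pvBumpL (cs : List String) (t : List (String × String)) :
    pvBumpA cs t = pvBumpL (cs.map PySem.Str.lower) t := by
  simp [pvBumpA, pvBumpL, List.any_map, Function.comp]

lemma pvStepB_eq (allowed_tools : Option (List String)) (lowered : List String)
    (st : List (List (String × String)) × List (List (String × String)) × List (List (String × String)))
    (task : List (String × String)) :
    pvStepB allowed_tools lowered st task =
      if pvSurv allowed_tools task then
        (if pvPr (pvBumpL lowered task) = "high" then
          (st.1 ++ [pvBumpL lowered task], st.2.1, st.2.2)
        else if pvPr (pvBumpL lowered task) = "low" then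
          (st.1, st.2.1, st.2.2 ++ [pvBumpL lowered task])
        else (st.1, st.2.1 ++ [pvBumpL lowered task], st.2.2))
      else st := by
  cases allowed_tools with
  | none => simp [pvStepB, pvSurv, pvBumpL, pvPr]
  | some ts =>
      cases ts with
      | nil => simp [pvStepB, pvSurv, pvBumpL, pvPr]
      | cons a rest =>
          by_cases hm : ((PySem.Dict.get? (PySem.Dict.mk task) "tool").getD "") = a ∨
              ((PySem.Dict.get? (PySem.Dict.mk task) "tool").getD "") ∈ rest <;>
            simp [pvStepB, pvSurv, pvBumpL, pvPr, hm]

-- B's loop, unrolled against the filtered-and-bumped list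
lemma pvFoldB (allowed_tools : Option (List String)) (lowered : List String) :
    ∀ (cs : List (List (String × String))) (h m l : List (List (String × String))),
    cs.foldl (pvStepB allowed_tools lowered) (h, m, l)
    = (h ++ ((cs.filter (pvSurv allowed_tools)).map (pvBumpL lowered)).filter (fun t => pvPr t == "high"),
       m ++ ((cs.filter (pvSurv allowed_tools)).map (pvBumpL lowered)).filter
         (fun t => !(pvPr t == "high") && !(pvPr t == "low")),
       l ++ ((cs.filter (pvSurv allowed_tools)).map (pvBumpL lowered)).filter (fun t => pvPr t == "low")) := by
  intro cs
  induction cs with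
  | nil => intro h m l; simp
  | cons x xs ih =>
      intro h m l
      simp only [List.foldl_cons, List.filter_cons, pvStepB_eq]
      by_cases hs : pvSurv allowed_tools x = true
      · simp only [hs, if_pos, List.map_cons, List.filter_cons]
        by_cases hp : pvPr (pvBumpL lowered x) = "high"
        · simp only [hp, ih]
          simp
        · by_cases hl : pvPr (pvBumpL lowered x) = "low"
          · simp only [hp, ih]
            simp [hl]
          · simp only [hp, hl, ih]
            simp [hp, hl]
      · simp only [hs, ih]
        simp

-- A's filtered-then-bumped list is the same filtered-and-mapped list B walks
lemma pvA_shape (candidates : List (List (String × String))) (constraints : Option (List String)) (allowed_tools : Option (List String)) :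
    converge_py candidates constraints allowed_tools
    = PySem.List.sorted
        ((candidates.filter (pvSurv allowed_tools)).map
          (pvBumpL ((constraints.getD []).map PySem.Str.lower))) pvPrioKey := by
  by_cases hc : candidates = []
  · subst hc; simp [converge_py, PySem.List.sorted_eq_nil_iff]
  · have hfil :
        (match allowed_tools with
          | some (a :: rest) =>
              candidates.filter (fun c =>
                PySem.Set.contains (PySem.Set.ofList (a :: rest))
                  ((PySem.Dict.get? (PySem.Dict.mk c) "tool").getD ""))
          | _ => candidates) = candidates.filter (pvSurv allowed_tools) := by
      cases allowed_tools with
      | none =>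
          rw [show pvSurv (none : Option (List String)) = fun _ => true from rfl,
            List.filter_true]
      | some ts =>
          cases ts with
          | nil =>
              rw [show pvSurv (some ([] : List String)) = fun _ => true from rfl,
                List.filter_true]
          | cons a rest =>
              exact List.filter_congr (fun c _ => rfl)
    have hmapnil : ∀ (G : List (List (String × String))), G.map (pvBumpL []) = G := by
      intro G
      have h := List.map_congr_left (fun t (_ : t ∈ G) => pvBumpL_nil t)
      simpa using h
    cases constraints with
    | none =>
        simp only [converge_py, if_neg hc, hfil, Option.getD_none, List.map_nil, hmapnil]
    | some ks =>
        cases ks with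
        | nil =>
            simp only [converge_py, if_neg hc, hfil, Option.getD_some, List.map_nil, hmapnil]
        | cons k rest =>
            simp only [converge_py, if_neg hc, hfil, Option.getD_some]
            rw [List.map_congr_left (fun t _ => pvBumpA_eq_pvBumpL (k :: rest) t)]

-- ===== VERDICT (by name: the statement is the Claim_ definition above) =====
theorem converge_py_spec : Claim_equal_converge_py := by
  intro candidates constraints allowed_tools _hdom _hpre
  unfold Spec_converge_py
  rw [pvA_shape, pvSorted_buckets]
  simp only [converge_py_alt]
  rw [pvFoldB]
  have e0 : (fun x => pvPrioKey x == 0) = (fun t => pvPr t == "high") := funext pvKey0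
  have e1 : (fun x => pvPrioKey x == 1) = (fun t => !(pvPr t == "high") && !(pvPr t == "low")) := funext pvKey1
  have e2 : (fun x => pvPrioKey x == 2) = (fun t => pvPr t == "low") := funext pvKey2
  rw [e0, e1, e2]
  simp
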